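-- pv_equiv track=rewrite | github.com/sumanth9897/Machine-Learning | S20200010125_apriori.py | associt_rules
-- ===== SOURCE A (Python) =====
-- def associt_rules(transac):
--     Infer_Rules = []
--     k = len(transac)
--     for j in range(1,k):
--         item_sets = []
--         recfunction(item_sets,transac,[],0,j)
--         for item in item_sets:
--             Infer_Rules.append(item)
--     return Infer_Rules
--
-- def recfunction(item_sets, it_ems, ki, indeex, g):
--     if len(ki) == g:
--         item_sets.append(ki)
--     if indeex < len(it_ems) and len(ki) != g:
--         temp_ki = ki.copy()
--         ki.append(it_ems[indeex])
--         recfunction(item_sets, it_ems, ki, indeex+1, g)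
--         recfunction(item_sets, it_ems, temp_ki, indeex+1, g)
-- ===== SOURCE B (Python) =====
-- import itertools
--
-- def associt_rules(transac):
--     Infer_Rules = []
--     for j in range(1, len(transac)):
--         Infer_Rules.extend(list(c) for c in itertools.combinations(transac, j))
--     return Infer_Rules
-- ===== Notes on version B (the rewrite author's own statement) =====
-- stated objective: idiomatic
-- what changed: Replaced the hand-written include/exclude recursion (which builds each size-j subset list via mutation and copies) with itertools.combinations per size, extending the result directly.
import Mathlib
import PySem

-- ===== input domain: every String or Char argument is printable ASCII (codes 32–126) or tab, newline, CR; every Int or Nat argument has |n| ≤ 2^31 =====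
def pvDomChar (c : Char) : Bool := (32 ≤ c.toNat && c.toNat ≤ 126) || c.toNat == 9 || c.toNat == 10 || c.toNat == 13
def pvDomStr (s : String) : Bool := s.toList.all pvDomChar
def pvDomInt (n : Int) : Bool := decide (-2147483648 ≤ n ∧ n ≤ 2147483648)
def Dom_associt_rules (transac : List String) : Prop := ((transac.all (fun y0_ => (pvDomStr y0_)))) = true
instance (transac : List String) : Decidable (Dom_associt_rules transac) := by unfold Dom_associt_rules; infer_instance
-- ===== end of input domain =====

-- B replaces A's hand-written include/exclude recursion with per-size combinations (itertools.combinations); idiomatic, same output.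

-- ===== PORT A =====
-- recfunction mutates item_sets in Python; ported as returning the extended accumulator.
def recfunction (item_sets : List (List String)) (it_ems : List String)
    (ki : List String) (indeex : Nat) (g : Int) : List (List String) :=
  let item_sets := if (ki.length : Int) = g then item_sets ++ [ki] else item_sets
  if h : indeex < it_ems.length ∧ (ki.length : Int) ≠ g then
    let s1 := recfunction item_sets it_ems (ki ++ [it_ems[indeex]'h.1]) (indeex + 1) g
    recfunction s1 it_ems ki (indeex + 1) g
  else item_sets
termination_by it_ems.length - indeex

def associt_rules (transac : List String) : List (List String) :=
  let k := (transac.length : Int)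
  (PySem.List.pyRange 1 k 1).foldl
    (fun infer j =>
      let item_sets := recfunction [] transac [] 0 j
      item_sets.foldl (fun infer item => infer ++ [item]) infer)
    []

-- ===== PORT B =====
-- combs n xs = itertools.combinations(xs, n) (each tuple as a list), in itertools' lexicographic-by-index order
def combs : Nat → List String → List (List String)
  | 0, _ => [[]]
  | _ + 1, [] => []
  | n + 1, x :: xs => (combs n xs).map (fun c => x :: c) ++ combs (n + 1) xs

def associt_rules_alt (transac : List String) : List (List String) :=
  (PySem.List.pyRange 1 (transac.length : Int) 1).foldl
    (fun out j => out ++ combs j.toNat transac) []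

-- ===== PRECONDITION & SPEC =====
def Spec_associt_rules (transac : List String) (out : List (List String)) : Prop := out = associt_rules_alt transac
instance (transac : List String) (out : List (List String)) : Decidable (Spec_associt_rules transac out) := by unfold Spec_associt_rules; infer_instance

-- ===== CLAIM (what is proved, stated in full; the proofs are below) =====
def Claim_equal_associt_rules : Prop := ∀ (transac : List String), Dom_associt_rules transac → Spec_associt_rules transac (associt_rules transac)

-- ===== LEMMAS AND PROOFS =====

theorem foldl_append_singleton (xs : List (List String)) (acc : List (List String)) :
    xs.foldl (fun a x => a ++ [x]) acc = acc ++ xs := by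
  induction xs generalizing acc with
  | nil => simp [List.foldl]
  | cons x xs ih => simp [List.foldl, ih]

-- the recursion's characterisation: it appends all size-n extensions of ki drawn from it_ems.drop indeex
theorem recfunction_eq (it_ems : List String) (n : Nat) :
    ∀ (indeex : Nat) (ki : List String) (item_sets : List (List String)),
    recfunction item_sets it_ems ki indeex ((ki.length : Int) + n) =
      item_sets ++ (combs n (it_ems.drop indeex)).map (fun c => ki ++ c) := by
  have key : ∀ (fuel indeex : Nat), it_ems.length - indeex ≤ fuel →
      ∀ (n : Nat) (ki : List String) (item_sets : List (List String)),
      recfunction item_sets it_ems ki indeex ((ki.length : Int) + n) =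
        item_sets ++ (combs n (it_ems.drop indeex)).map (fun c => ki ++ c) := by
    intro fuel
    induction fuel with
    | zero =>
      intro indeex hle n ki item_sets
      have hge : it_ems.length ≤ indeex := by omega
      have hdrop : it_ems.drop indeex = [] := List.drop_eq_nil_of_le hge
      rw [recfunction]
      cases n with
      | zero =>
        rw [if_pos (by push_cast; ring), dif_neg (by rintro ⟨_, h2⟩; push_cast at h2; omega)]
        simp [hdrop, combs]
      | succ m =>
        rw [if_neg (by push_cast; omega), dif_neg (by rintro ⟨h1, _⟩; omega)]
        simp [hdrop, combs]
    | succ fuel ih =>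
      intro indeex hle n ki item_sets
      cases n with
      | zero =>
        rw [recfunction,
            if_pos (by push_cast; ring), dif_neg (by rintro ⟨_, h2⟩; push_cast at h2; omega)]
        simp [combs]
      | succ m =>
        have hne : (ki.length : Int) ≠ (ki.length : Int) + ((m + 1 : Nat) : Int) := by
          push_cast; omega
        by_cases hlt : indeex < it_ems.length
        · have hrec1 := ih (indeex + 1) (by omega) m (ki ++ [it_ems[indeex]])
          have hrec2 := ih (indeex + 1) (by omega) (m + 1) ki
          have hlen1 : ((ki ++ [it_ems[indeex]]).length : Int) + (m : Int) =
              (ki.length : Int) + ((m + 1 : Nat) : Int) := by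
            simp; omega
          have e1 : ∀ s : List (List String),
              recfunction s it_ems (ki ++ [it_ems[indeex]]) (indeex + 1)
                ((ki.length : Int) + ((m + 1 : Nat) : Int)) =
              s ++ (combs m (it_ems.drop (indeex + 1))).map
                (fun c => ki ++ [it_ems[indeex]] ++ c) := by
            intro s; rw [← hlen1]; exact hrec1 s
          have hdrop : it_ems.drop indeex = it_ems[indeex] :: it_ems.drop (indeex + 1) :=
            List.drop_eq_getElem_cons hlt
          rw [recfunction, if_neg hne, dif_pos ⟨hlt, hne⟩, e1, hrec2, hdrop]
          simp [combs, List.map_map, Function.comp]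
        · have hdrop : it_ems.drop indeex = [] := List.drop_eq_nil_of_le (by omega)
          rw [recfunction, if_neg hne, dif_neg (by rintro ⟨h1, _⟩; exact hlt h1)]
          simp [hdrop, combs]
  intro indeex ki item_sets
  exact key (it_ems.length - indeex) indeex (le_refl _) n ki item_sets

theorem recfunction_top (transac : List String) (j : Int) (hj : 0 ≤ j) :
    recfunction [] transac [] 0 j = combs j.toNat transac := by
  have h := recfunction_eq transac j.toNat 0 [] []
  have : (([] : List String).length : Int) + (j.toNat : Int) = j := by
    simp [Int.toNat_of_nonneg hj]
  rw [this] at h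
  simpa using h

-- ===== VERDICT (by name: the statement is the Claim_ definition above) =====
theorem associt_rules_spec : Claim_equal_associt_rules := by
  intro transac _
  show associt_rules transac = associt_rules_alt transac
  unfold associt_rules associt_rules_alt
  apply PySem.List.foldl_congr_mem
  intro acc j hj
  have h1 : 1 ≤ j := ((PySem.List.mem_pyRange_one).1 hj).1
  rw [recfunction_top transac j (by omega), foldl_append_singleton]
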